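-- pv_equiv track=rewrite | github.com/00alan/tts | helpers/calendar_helper.py | compactify_periods
-- ===== SOURCE A (Python) =====
-- def compactify_periods(busy_periods):
--     """Function to group and compactify response from free/busy query by date."""
--     # Outputs a dictionary where each date has a list of tuples representing start and end times.
--     compact_periods = {}
--     for period in busy_periods:
--         date = period['start'][:10]  # Extract the date 'YYYY-MM-DD'
--         start_time = period['start'][11:16]  # Extract and format the start time 'HH:MM'
--         end_time = period['end'][11:16]  # Extract and format the end time 'HH:MM'
--
--         # Append the start and end time tuple to the list of times for the corresponding date
--         if date not in compact_periods:
--             compact_periods[date] = []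
--         compact_periods[date].append((start_time, end_time))
--
--     return compact_periods
-- ===== SOURCE B (Python) =====
-- def compactify_periods(busy_periods):
--     """Group busy periods by date: collect the distinct dates in order of first
--     appearance, then build each date's list of (start, end) times by a per-date
--     scan of the input (dict comprehension), instead of A's single pass that
--     membership-tests and appends into a growing dict."""
--     dates = []
--     for period in busy_periods:
--         date = period['start'][:10]
--         if date not in dates:
--             dates.append(date)
--     return {
--         date: [(p['start'][11:16], p['end'][11:16])
--                for p in busy_periods if p['start'][:10] == date]
--         for date in dates
--     }
-- ===== Notes on version B (the rewrite author's own statement) =====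
-- stated objective: alternative
-- what changed: B replaces A's single pass that membership-tests and appends into a growing dict by a two-phase decomposition: first dedup the dates in first-occurrence order, then a dict comprehension that rebuilds each date's time list by filtering the whole input per date.
import Mathlib
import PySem

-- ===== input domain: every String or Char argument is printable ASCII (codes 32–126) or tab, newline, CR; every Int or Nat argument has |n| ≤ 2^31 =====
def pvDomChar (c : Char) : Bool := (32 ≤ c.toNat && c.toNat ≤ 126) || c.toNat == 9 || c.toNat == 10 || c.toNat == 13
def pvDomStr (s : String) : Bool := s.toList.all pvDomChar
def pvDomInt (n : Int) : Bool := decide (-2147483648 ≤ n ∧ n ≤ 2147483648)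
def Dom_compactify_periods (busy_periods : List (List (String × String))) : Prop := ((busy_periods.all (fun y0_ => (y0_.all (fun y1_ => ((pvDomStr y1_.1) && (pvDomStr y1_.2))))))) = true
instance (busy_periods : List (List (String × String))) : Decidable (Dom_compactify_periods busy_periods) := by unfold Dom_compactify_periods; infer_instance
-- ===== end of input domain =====

-- B groups by date via a different decomposition (dedup the dates first, then one filter pass
-- per date) instead of A's single dict-building pass; same value, not claimed faster.

-- ===== PORT A =====
-- period['start'] / period['end'] (first-match association lookup; the KeyError case is excluded by Pre_, getD "" is never used there)
def cpStart (p : List (String × String)) : String := (p.lookup "start").getD ""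
def cpEnd (p : List (String × String)) : String := (p.lookup "end").getD ""
-- period['start'][:10]
def cpDate (p : List (String × String)) : String := PySem.Str.slice (cpStart p) none (some 10)
-- (period['start'][11:16], period['end'][11:16])
def cpVal (p : List (String × String)) : String × String :=
  (PySem.Str.slice (cpStart p) (some 11) (some 16), PySem.Str.slice (cpEnd p) (some 11) (some 16))

def compactify_periods (busy_periods : List (List (String × String))) : List (String × List (String × String)) :=
  (busy_periods.foldl
    (fun d period =>
      ((if d.contains (cpDate period) then d
        else d.insert (cpDate period) ([] : List (String × String))).modify
        (cpDate period) [] (fun l => l ++ [cpVal period])))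
    (PySem.Dict.empty : PySem.Dict String (List (String × String)))).items

-- ===== PORT B =====
def compactify_periods_alt (busy_periods : List (List (String × String))) : List (String × List (String × String)) :=
  (busy_periods.foldl
    (fun ds period => if cpDate period ∈ ds then ds else ds ++ [cpDate period])
    ([] : List String)).map
    (fun date => (date, (busy_periods.filter (fun p => cpDate p == date)).map cpVal))

-- ===== PRECONDITION & SPEC =====
-- Pre_ excludes exactly the inputs where some period lacks a 'start' or 'end' key, on which A raises KeyError.
def Pre_compactify_periods (busy_periods : List (List (String × String))) : Prop :=
  busy_periods.all (fun p => (p.lookup "start").isSome && (p.lookup "end").isSome) = true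
instance (busy_periods : List (List (String × String))) : Decidable (Pre_compactify_periods busy_periods) := by unfold Pre_compactify_periods; infer_instance
def pvWitness_compactify_periods : (List (List (String × String))) :=
  [[("start", "2024-01-02T09:00:00"), ("end", "2024-01-02T10:30:00")],
   [("start", "2024-01-03T11:00:00"), ("end", "2024-01-03T12:00:00")]]

def Spec_compactify_periods (busy_periods : List (List (String × String))) (out : List (String × List (String × String))) : Prop := out = compactify_periods_alt busy_periods
instance (busy_periods : List (List (String × String))) (out : List (String × List (String × String))) : Decidable (Spec_compactify_periods busy_periods out) := by unfold Spec_compactify_periods; infer_instance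

-- ===== CLAIM (what is proved, stated in full; the proofs are below) =====
def Claim_equal_compactify_periods : Prop := ∀ (busy_periods : List (List (String × String))), Dom_compactify_periods busy_periods → Pre_compactify_periods busy_periods → Spec_compactify_periods busy_periods (compactify_periods busy_periods)

-- ===== LEMMAS AND PROOFS =====

-- A's "insert [] if absent, then append" step is one Dict.modify.
theorem cp_step_eq_modify (d : PySem.Dict String (List (String × String))) (k : String) (v : String × String) :
    ((if d.contains k then d else d.insert k ([] : List (String × String))).modify k []
      (fun l => l ++ [v])) = d.modify k [] (fun l => l ++ [v]) := by
  by_cases h : d.contains k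
  · simp [h]
  · simp only [h, Bool.false_eq_true, ite_false, PySem.Dict.modify,
      PySem.Dict.getD_insert_self, PySem.Dict.insert_insert_self]
    rw [PySem.Dict.getD_of_not_contains d [] (by simpa using h)]

-- A's dict, characterised: keys = dates in first-occurrence order, value at k = per-date filter.
theorem cp_A_eq (busy_periods : List (List (String × String))) :
    compactify_periods busy_periods =
      (PySem.Set.ofList (busy_periods.map cpDate)).map
        (fun date => (date, (busy_periods.filter (fun p => cpDate p == date)).map cpVal)) := by
  unfold compactify_periods
  have hstep : (fun (d : PySem.Dict String (List (String × String))) period =>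
      ((if d.contains (cpDate period) then d
        else d.insert (cpDate period) ([] : List (String × String))).modify
        (cpDate period) [] (fun l => l ++ [cpVal period]))) =
      (fun d period => d.modify (cpDate period) [] (fun l => l ++ [cpVal period])) := by
    funext d period; exact cp_step_eq_modify d (cpDate period) (cpVal period)
  rw [hstep]
  set D := busy_periods.foldl
      (fun d period => d.modify (cpDate period) [] (fun l => l ++ [cpVal period]))
      (PySem.Dict.empty : PySem.Dict String (List (String × String))) with hD
  have hkeys : D.keys = PySem.Set.ofList (busy_periods.map cpDate) := by
    rw [hD, PySem.Dict.keys_foldl_modify_key busy_periods cpDate []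
        (fun _ period => (fun l => l ++ [cpVal period]))]
    simp [PySem.Set.update_nil_left]
  have hnodup : D.keys.Nodup := by
    rw [hkeys]; exact PySem.Set.nodup_ofList _
  have hgetD : ∀ k, D.getD k [] = (busy_periods.filter (fun p => cpDate p == k)).map cpVal := by
    intro k
    have hmap : D = (busy_periods.map (fun p => (cpDate p, cpVal p))).foldl
        (fun d q => d.modify q.1 [] (fun l => l ++ [q.2]))
        (PySem.Dict.empty : PySem.Dict String (List (String × String))) := by
      rw [hD, List.foldl_map]
    rw [hmap, PySem.Dict.getD_foldl_modify_append]
    simp [List.filter_map, List.map_map, Function.comp_def]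
  rw [PySem.Dict.items_eq_map_keys D hnodup [], hkeys]
  exact List.map_congr_left (fun k _ => by rw [hgetD k])

-- B's date-dedup loop builds the same first-occurrence date list.
theorem cp_B_dates (busy_periods : List (List (String × String))) :
    busy_periods.foldl
      (fun ds period => if cpDate period ∈ ds then ds else ds ++ [cpDate period])
      ([] : List String) = PySem.Set.ofList (busy_periods.map cpDate) := by
  have h : (fun (ds : List String) period =>
      if cpDate period ∈ ds then ds else ds ++ [cpDate period]) =
      (fun ds period => PySem.Set.add ds (cpDate period)) := by
    funext ds period; rw [PySem.Set.add_eq_ite]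
  rw [h, ← PySem.Set.update_map_eq_foldl_add, PySem.Set.update_nil_left]

-- ===== VERDICT (by name: the statement is the Claim_ definition above) =====
theorem compactify_periods_spec : Claim_equal_compactify_periods := by
  intro busy_periods _ _
  unfold Spec_compactify_periods compactify_periods_alt
  rw [cp_A_eq, cp_B_dates]
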